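-- pv_equiv track=rewrite | github.com/gyoogle/YAPP_Algorithm | code/5주차/모의고사/모의고사_지원.py | solution
-- ===== SOURCE A (Python) =====
-- def solution(answers):
--     answer = []
--     score = [0,0,0,0]
--     person1 = [1,2,3,4,5]
--     person2 = [2,1,2,3,2,4,2,5]
--     person3 = [3,3,1,1,2,2,4,4,5,5]
--     for i in range(len(answers)):
--         if answers[i] == person1[i%5]:
--             score[1] += 1
--         if answers[i] == person2[i%8]:
--             score[2] += 1
--         if answers[i] == person3[i%10]:
--             score[3] += 1
--
--     for i in range(len(score)):
--         if score[i] == max(score):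
--             answer.append(i)
--     return answer
-- ===== SOURCE B (Python) =====
-- def solution(answers):
--     # Bucket indices by (i % 40, answer) in one pass (40 = lcm(5,8,10): every
--     # pattern value depends only on i % 40), then each score is a fixed sum of
--     # 40 bucket lookups -- no per-element pattern comparison at all.
--     buckets = {}
--     for i, a in enumerate(answers):
--         k = (i % 40, a)
--         buckets[k] = buckets.get(k, 0) + 1
--     patterns = [[1, 2, 3, 4, 5],
--                 [2, 1, 2, 3, 2, 4, 2, 5],
--                 [3, 3, 1, 1, 2, 2, 4, 4, 5, 5]]
--     score = [0] + [sum(buckets.get((r, p[r % len(p)]), 0) for r in range(40))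
--                    for p in patterns]
--     m = max(score)
--     return [i for i, s in enumerate(score) if s == m]
-- ===== Notes on version B (the rewrite author's own statement) =====
-- stated objective: alternative
-- what changed: Instead of comparing every answer against the three cyclic patterns, B makes one bucketing pass that counts answers grouped by (index mod 40, value) -- 40 = lcm of the pattern periods -- and then obtains each score as a fixed 40-term sum of bucket lookups, keeping the leading 0 slot and the tie-inclusive argmax.
import Mathlib
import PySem

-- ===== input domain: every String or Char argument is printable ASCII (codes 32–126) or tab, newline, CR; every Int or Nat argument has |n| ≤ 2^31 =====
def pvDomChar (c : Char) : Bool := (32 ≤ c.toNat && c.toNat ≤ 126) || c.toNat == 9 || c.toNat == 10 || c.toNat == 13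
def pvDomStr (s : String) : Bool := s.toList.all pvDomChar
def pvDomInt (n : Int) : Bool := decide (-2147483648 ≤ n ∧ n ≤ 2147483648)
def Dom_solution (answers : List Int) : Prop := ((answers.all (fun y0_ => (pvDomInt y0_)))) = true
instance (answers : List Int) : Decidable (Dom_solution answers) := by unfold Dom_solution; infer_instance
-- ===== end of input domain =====

-- B replaces A's per-element pattern comparisons by one bucketing pass counting answers
-- by (index mod 40, value) — 40 = lcm of the pattern periods — then each score is a fixed
-- 40-term sum of bucket lookups (objective: alternative; same asymptotic cost).

-- ===== PORT A =====
def pvPerson1 : List Int := [1,2,3,4,5]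
def pvPerson2 : List Int := [2,1,2,3,2,4,2,5]
def pvPerson3 : List Int := [3,3,1,1,2,2,4,4,5,5]

-- the body of A's first for-loop (score list mutated in place)
def stepA (answers : List Int) (sc : List Int) (i : Int) : List Int :=
  let sc := if PySem.List.pyGetD answers i 0 = PySem.List.pyGetD pvPerson1 (PySem.Int.mod i 5) 0
            then sc.set 1 (sc.getD 1 0 + 1) else sc
  let sc := if PySem.List.pyGetD answers i 0 = PySem.List.pyGetD pvPerson2 (PySem.Int.mod i 8) 0
            then sc.set 2 (sc.getD 2 0 + 1) else sc
  if PySem.List.pyGetD answers i 0 = PySem.List.pyGetD pvPerson3 (PySem.Int.mod i 10) 0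
  then sc.set 3 (sc.getD 3 0 + 1) else sc

def solution (answers : List Int) : List Int :=
  let score : List Int :=
    (PySem.List.pyRange 0 (answers.length : Int) 1).foldl (stepA answers) [0,0,0,0]
  let m : Int := (PySem.List.max? score (fun x => x)).getD 0
  (PySem.List.pyRange 0 (score.length : Int) 1).foldl
    (fun ans i => if PySem.List.pyGetD score i 0 = m then ans ++ [i] else ans) []

-- ===== PORT B =====
def solution_alt (answers : List Int) : List Int :=
  let buckets : PySem.Dict (Int × Int) Int :=
    (PySem.List.enumerate answers 0).foldl
      (fun d ia => d.insert (PySem.Int.mod ia.1 40, ia.2)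
                            (d.getD (PySem.Int.mod ia.1 40, ia.2) 0 + 1))
      PySem.Dict.empty
  let patterns : List (List Int) := [[1,2,3,4,5],[2,1,2,3,2,4,2,5],[3,3,1,1,2,2,4,4,5,5]]
  let score : List Int := 0 :: patterns.map (fun p =>
    ((PySem.List.pyRange 0 40 1).map (fun r =>
      buckets.getD (r, PySem.List.pyGetD p (PySem.Int.mod r (p.length : Int)) 0) 0)).sum)
  let m : Int := (PySem.List.max? score (fun x => x)).getD 0
  (PySem.List.enumerate score 0).foldr (fun is acc => if is.2 = m then is.1 :: acc else acc) []

-- ===== PRECONDITION & SPEC =====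
def Spec_solution (answers : List Int) (out : List Int) : Prop := out = solution_alt answers
instance (answers : List Int) (out : List Int) : Decidable (Spec_solution answers out) := by unfold Spec_solution; infer_instance

-- ===== CLAIM (what is proved, stated in full; the proofs are below) =====
def Claim_equal_solution : Prop := ∀ (answers : List Int), Dom_solution answers → Spec_solution answers (solution answers)

-- ===== LEMMAS AND PROOFS =====

-- canonical per-pattern count of matches, carrying the running index
def cnt (p : List Int) : List Int → Nat → Int
  | [], _ => 0
  | a :: rest, j => (if a = p.getD (j % p.length) 0 then (1:Int) else 0) + cnt p rest (j+1)

-- the list of bucket keys B's first loop inserts, starting at index s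
def K (ans : List Int) (s : Nat) : List (Int × Int) :=
  (PySem.List.enumerate ans (s : Int)).map (fun ia => (PySem.Int.mod ia.1 40, ia.2))

lemma mod_natCast' (s : Nat) (k : Nat) : PySem.Int.mod (s : Int) (k : Int) = ((s % k : Nat) : Int) :=
  PySem.Int.mod_natCast s k

lemma foldA_eq (answers : List Int) (s : Nat) (n : Nat) (hn : answers.length - s = n)
    (a b c : Int) :
    (PySem.List.pyRange (s : Int) (answers.length : Int) 1).foldl (stepA answers) [0,a,b,c]
    = [0, a + cnt pvPerson1 (answers.drop s) s,
          b + cnt pvPerson2 (answers.drop s) s,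
          c + cnt pvPerson3 (answers.drop s) s] := by
  induction n generalizing s a b c with
  | zero =>
    have hle : answers.length ≤ s := by omega
    rw [PySem.List.pyRange_one_eq_nil (by exact_mod_cast hle), List.drop_eq_nil_of_le hle]
    simp [cnt]
  | succ n ih =>
    have hlt : s < answers.length := by omega
    rw [PySem.List.pyRange_one_cons (by exact_mod_cast hlt)]
    have hdrop : answers.drop s = answers[s] :: answers.drop (s+1) :=
      List.drop_eq_getElem_cons hlt
    have hget : PySem.List.pyGetD answers (s : Int) 0 = answers[s] := by
      rw [PySem.List.pyGetD_natCast]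
      exact List.getD_eq_getElem _ _ hlt
    have hstep : ∀ a b c : Int, stepA answers [0,a,b,c] (s : Int) =
        [0, a + (if answers[s] = pvPerson1.getD (s % 5) 0 then (1:Int) else 0),
            b + (if answers[s] = pvPerson2.getD (s % 8) 0 then (1:Int) else 0),
            c + (if answers[s] = pvPerson3.getD (s % 10) 0 then (1:Int) else 0)] := by
      intro a b c
      have hc1 : PySem.Int.mod (s : Int) 5 = ((s % 5 : Nat) : Int) := by
        exact_mod_cast mod_natCast' s 5
      have hc2 : PySem.Int.mod (s : Int) 8 = ((s % 8 : Nat) : Int) := by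
        exact_mod_cast mod_natCast' s 8
      have hc3 : PySem.Int.mod (s : Int) 10 = ((s % 10 : Nat) : Int) := by
        exact_mod_cast mod_natCast' s 10
      simp only [stepA, hget, hc1, hc2, hc3, PySem.List.pyGetD_natCast]
      split_ifs <;> simp [List.set, List.getD]
    have hs1 : ((s : Int) + 1) = ((s + 1 : Nat) : Int) := by push_cast; ring
    rw [List.foldl_cons, hstep, hs1, ih (s+1) (by omega), hdrop]
    have h1 : pvPerson1.length = 5 := rfl
    have h2 : pvPerson2.length = 8 := rfl
    have h3 : pvPerson3.length = 10 := rfl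
    simp only [cnt, h1, h2, h3, List.cons.injEq, true_and, and_true]
    refine ⟨by ring, by ring, by ring⟩

-- the 40-term bucket-count sum for a pattern equals the direct match count
lemma sumK (p : List Int) (hdvd : p.length ∣ 40)
    (ans : List Int) (s : Nat) :
    ((PySem.List.pyRange 0 40 1).map (fun r =>
      ((K ans s).count (r, PySem.List.pyGetD p (PySem.Int.mod r (p.length : Int)) 0) : Int))).sum
    = cnt p ans s := by
  induction ans generalizing s with
  | nil => simp [K, cnt, PySem.List.enumerate_nil]
  | cons a rest ih =>
    have h40 : PySem.Int.mod ((s : Nat) : Int) (40 : Int) = ((s % 40 : Nat) : Int) := by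
      exact_mod_cast mod_natCast' s 40
    have hs1 : ((s : Int) + 1) = ((s + 1 : Nat) : Int) := by push_cast; ring
    have hK : K (a :: rest) s = (((s % 40 : Nat) : Int), a) :: K rest (s + 1) := by
      simp only [K, PySem.List.enumerate_cons, List.map_cons, h40, hs1]
    rw [hK]
    have hcast : ∀ r : Int,
        (((((s % 40 : Nat) : Int), a) :: K rest (s + 1)).count
          (r, PySem.List.pyGetD p (PySem.Int.mod r (p.length : Int)) 0) : Int)
        = ((K rest (s + 1)).count (r, PySem.List.pyGetD p (PySem.Int.mod r (p.length : Int)) 0) : Int)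
          + if ((((s % 40 : Nat) : Int), a)
               = (r, PySem.List.pyGetD p (PySem.Int.mod r (p.length : Int)) 0)) then (1:Int) else 0 := by
      intro r
      rw [List.count_cons]
      simp only [beq_iff_eq]
      split_ifs <;> push_cast <;> ring
    rw [List.map_congr_left (fun r _ => hcast r), PySem.List.sum_map_add_int, ih (s + 1)]
    have hpv : PySem.List.pyGetD p (PySem.Int.mod (((s % 40 : Nat) : Int)) (p.length : Int)) 0
             = p.getD (s % p.length) 0 := by
      rw [show PySem.Int.mod (((s % 40 : Nat) : Int)) ((p.length : Nat) : Int)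
            = (((s % 40) % p.length : Nat) : Int) from mod_natCast' (s % 40) p.length,
          PySem.List.pyGetD_natCast, Nat.mod_mod_of_dvd s hdvd]
    have hmem : (((s % 40 : Nat) : Int)) ∈ PySem.List.pyRange 0 40 1 := by
      rw [PySem.List.mem_pyRange_one]
      constructor
      · positivity
      · exact_mod_cast Nat.mod_lt s (by norm_num)
    have hnd : (PySem.List.pyRange 0 40 1).Nodup := by decide
    have hone : ((PySem.List.pyRange 0 40 1).map
        (fun r => if r = ((s % 40 : Nat) : Int) then (1:Int) else 0)).sum = 1 := by
      have h := PySem.List.sum_map_ite_one_zero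
        (fun r => r == ((s % 40 : Nat) : Int)) (PySem.List.pyRange 0 40 1)
      simp only [beq_iff_eq] at h
      rw [h, show (PySem.List.pyRange 0 40 1).countP (fun r => r == ((s % 40 : Nat) : Int))
            = (PySem.List.pyRange 0 40 1).count ((s % 40 : Nat) : Int) from rfl,
          List.count_eq_one_of_mem hnd hmem]
      norm_num
    have hind : ((PySem.List.pyRange 0 40 1).map (fun r =>
        if ((((s % 40 : Nat) : Int), a)
           = (r, PySem.List.pyGetD p (PySem.Int.mod r (p.length : Int)) 0)) then (1:Int) else 0)).sum
        = if a = p.getD (s % p.length) 0 then (1:Int) else 0 := by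
      by_cases hq : a = p.getD (s % p.length) 0
      · rw [if_pos hq]
        have hpt : ∀ r ∈ PySem.List.pyRange 0 40 1,
            (if ((((s % 40 : Nat) : Int), a)
               = (r, PySem.List.pyGetD p (PySem.Int.mod r (p.length : Int)) 0)) then (1:Int) else 0)
            = if r = (((s % 40 : Nat) : Int)) then (1:Int) else 0 := by
          intro r _
          by_cases hr : r = (((s % 40 : Nat) : Int))
          · subst hr
            rw [hpv, ← hq, if_pos rfl, if_pos rfl]
          · rw [if_neg (fun h => hr (((Prod.mk.injEq _ _ _ _).mp h).1.symm)),
                if_neg hr]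
        rw [List.map_congr_left hpt, hone]
      · rw [if_neg hq]
        have hz : ∀ r ∈ PySem.List.pyRange 0 40 1,
            (if ((((s % 40 : Nat) : Int), a)
               = (r, PySem.List.pyGetD p (PySem.Int.mod r (p.length : Int)) 0)) then (1:Int) else 0)
            = 0 := by
          intro r _
          by_cases hr : r = (((s % 40 : Nat) : Int))
          · subst hr
            rw [hpv, if_neg (fun h => hq (((Prod.mk.injEq _ _ _ _).mp h).2))]
          · rw [if_neg (fun h => hr (((Prod.mk.injEq _ _ _ _).mp h).1.symm))]
        rw [List.map_congr_left hz]
        simp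
    rw [hind]
    show cnt p rest (s + 1) + _ = cnt p (a :: rest) s
    rw [cnt]
    ring

-- B's bucket lookup sum, stated on the real dict fold
lemma scoreB (p : List Int) (hdvd : p.length ∣ 40) (ans : List Int) :
    ((PySem.List.pyRange 0 40 1).map (fun r =>
      (((PySem.List.enumerate ans 0).foldl
        (fun d ia => d.insert (PySem.Int.mod ia.1 40, ia.2)
                              (d.getD (PySem.Int.mod ia.1 40, ia.2) 0 + 1))
        PySem.Dict.empty).getD (r, PySem.List.pyGetD p (PySem.Int.mod r (p.length : Int)) 0) 0))).sum
    = cnt p ans 0 := by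
  have hfold : (PySem.List.enumerate ans 0).foldl
        (fun d ia => d.insert (PySem.Int.mod ia.1 40, ia.2)
                              (d.getD (PySem.Int.mod ia.1 40, ia.2) 0 + 1))
        (PySem.Dict.empty : PySem.Dict (Int × Int) Int)
      = (K ans 0).foldl (fun d x => d.insert x (d.getD x 0 + 1))
        (PySem.Dict.empty : PySem.Dict (Int × Int) Int) := by
    simp only [K, Nat.cast_zero]
    rw [List.foldl_map]
  rw [hfold]
  simp only [PySem.Dict.getD_foldl_insert_add_one, PySem.Dict.getD_empty, zero_add]
  exact sumK p hdvd ans 0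

-- ===== VERDICT (by name: the statement is the Claim_ definition above) =====
theorem solution_spec : Claim_equal_solution := by
  intro answers _
  show solution answers = solution_alt answers
  unfold solution solution_alt
  have hscore :
      (PySem.List.pyRange 0 (answers.length : Int) 1).foldl (stepA answers) [0,0,0,0]
      = [0, cnt pvPerson1 answers 0, cnt pvPerson2 answers 0, cnt pvPerson3 answers 0] := by
    have := foldA_eq answers 0 answers.length (by omega) 0 0 0
    simpa using this
  rw [hscore]
  have hb1 := scoreB pvPerson1 (by decide) answers
  have hb2 := scoreB pvPerson2 (by decide) answers
  have hb3 := scoreB pvPerson3 (by decide) answers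
  rw [show ([1,2,3,4,5] : List Int) = pvPerson1 from rfl,
      show ([2,1,2,3,2,4,2,5] : List Int) = pvPerson2 from rfl,
      show ([3,3,1,1,2,2,4,4,5,5] : List Int) = pvPerson3 from rfl]
  simp only [List.map_cons, List.map_nil, hb1, hb2, hb3]
  set x := cnt pvPerson1 answers 0
  set y := cnt pvPerson2 answers 0
  set z := cnt pvPerson3 answers 0
  set m := (PySem.List.max? ([0, x, y, z] : List Int) (fun x => x)).getD 0 with hm
  have hr : PySem.List.pyRange 0 ((([0,x,y,z] : List Int).length : Nat) : Int) 1 = [0,1,2,3] := by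
    norm_num [PySem.List.pyRange_one]; decide
  rw [hr]
  norm_num [PySem.List.enumerate, PySem.List.pyGetD, PySem.List.pyGet?, PySem.List.pyIdx?,
    show ((1:Int).toNat = 1) from rfl, show ((2:Int).toNat = 2) from rfl,
    show ((3:Int).toNat = 3) from rfl, List.getElem_cons_succ, List.getElem_cons_zero]
  split_ifs <;> rfl
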